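-- pv_equiv track=rewrite | github.com/NewMountain/algo_practice | chapter_1/1_4.py | make_char_hist
-- ===== SOURCE A (Python) =====
-- def make_char_hist(string):
--     """Take a string and turn into character histogram."""
--     hist = {}
--     for char in string:
--         if char not in hist:
--             hist[char] = 1
--         else:
--             hist[char] += 1
--
--     return hist
-- ===== SOURCE B (Python) =====
-- def make_char_hist(string):
--     """Take a string and turn into character histogram."""
--     return {ch: sum(1 for c in string if c == ch) for ch in dict.fromkeys(string)}
-- ===== Notes on version B (the rewrite author's own statement) =====
-- stated objective: idiomatic
-- what changed: Replaces the single-pass mutating counting dict with a one-line dict comprehension over the distinct characters (dict.fromkeys for ordered dedup), counting each character with a generator sum.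
import Mathlib
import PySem

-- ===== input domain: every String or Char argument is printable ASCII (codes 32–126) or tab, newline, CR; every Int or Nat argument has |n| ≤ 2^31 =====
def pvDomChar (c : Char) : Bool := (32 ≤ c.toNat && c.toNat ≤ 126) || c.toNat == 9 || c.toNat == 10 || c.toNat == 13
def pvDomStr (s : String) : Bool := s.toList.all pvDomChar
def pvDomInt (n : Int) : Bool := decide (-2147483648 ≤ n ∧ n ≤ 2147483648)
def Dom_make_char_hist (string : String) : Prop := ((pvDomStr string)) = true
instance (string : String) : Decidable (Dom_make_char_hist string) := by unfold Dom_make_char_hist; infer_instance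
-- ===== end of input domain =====

-- B replaces A's single-pass counting dict by a dict comprehension over the distinct
-- characters (first-occurrence order), counting each with a generator sum (alternative decomposition).

-- ===== PORT A =====
-- A: hist = {}; for char in string: if char not in hist: hist[char] = 1 else: hist[char] += 1; return hist
def make_char_hist (string : String) : List (String × Int) :=
  (string.toList.foldl
    (fun hist c =>
      if (PySem.Dict.contains hist (String.ofList [c])) = false then
        PySem.Dict.insert hist (String.ofList [c]) (1 : Int)
      else
        PySem.Dict.modify hist (String.ofList [c]) 0 (· + 1))
    PySem.Dict.empty).items

-- ===== PORT B =====
-- B: {ch: sum(1 for c in string if c == ch) for ch in dict.fromkeys(string)}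
def make_char_hist_alt (string : String) : List (String × Int) :=
  (PySem.List.dedup string.toList).map
    (fun ch => (String.ofList [ch],
      ((string.toList.filter (fun c => c == ch)).map (fun _ => (1 : Int))).sum))

-- ===== PRECONDITION & SPEC =====
def Spec_make_char_hist (string : String) (out : List (String × Int)) : Prop := out = make_char_hist_alt string
instance (string : String) (out : List (String × Int)) : Decidable (Spec_make_char_hist string out) := by unfold Spec_make_char_hist; infer_instance

-- ===== CLAIM (what is proved, stated in full; the proofs are below) =====
def Claim_equal_make_char_hist : Prop := ∀ (string : String), Dom_make_char_hist string → Spec_make_char_hist string (make_char_hist string)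

-- ===== LEMMAS AND PROOFS =====

-- the key function wrapping a character as a one-character string is injective
theorem pvKeyInj : Function.Injective (fun c : Char => String.ofList [c]) := by
  intro a b h
  have := congrArg String.toList h
  simpa using this

-- A's loop body is exactly the Counter step d.modify k 0 (·+1)
theorem pvStepEq (hist : PySem.Dict String Int) (c : Char) :
    (if (PySem.Dict.contains hist (String.ofList [c])) = false then
        PySem.Dict.insert hist (String.ofList [c]) (1 : Int)
      else
        PySem.Dict.modify hist (String.ofList [c]) 0 (· + 1))
    = PySem.Dict.modify hist (String.ofList [c]) 0 (· + 1) := by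
  by_cases h : PySem.Dict.contains hist (String.ofList [c]) = false
  · simp only [h, if_true]
    simp [PySem.Dict.modify, PySem.Dict.getD_of_not_contains _ _ h]
  · simp [h]

-- Python set/dedup of a mapped list under an injective map
theorem pvOfListMap {α β : Type} [DecidableEq α] [DecidableEq β]
    (f : α → β) (hf : Function.Injective f) (xs : List α) (acc : List α) :
    (xs.map f).foldl PySem.Set.add (acc.map f) = (xs.foldl PySem.Set.add acc).map f := by
  induction xs generalizing acc with
  | nil => rfl
  | cons x t ih =>
      simp only [List.map_cons, List.foldl_cons]
      have hadd : PySem.Set.add (acc.map f) (f x) = (PySem.Set.add acc x).map f := by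
        have hmem : (∃ a ∈ acc, f a = f x) ↔ x ∈ acc := by
          simp [hf.eq_iff]
        by_cases hx : x ∈ acc <;>
          simp [PySem.Set.add, PySem.Set.contains, hmem, hx]
      rw [hadd, ih]

theorem make_char_hist_eq (string : String) :
    make_char_hist string = make_char_hist_alt string := by
  unfold make_char_hist make_char_hist_alt
  have h1 : (string.toList.foldl
      (fun hist c =>
        if (PySem.Dict.contains hist (String.ofList [c])) = false then
          PySem.Dict.insert hist (String.ofList [c]) (1 : Int)
        else
          PySem.Dict.modify hist (String.ofList [c]) 0 (· + 1))
      PySem.Dict.empty)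
      = PySem.Dict.counter (string.toList.map (fun c => String.ofList [c])) := by
    rw [PySem.Dict.counter_eq_foldl, List.foldl_map]
    apply PySem.List.foldl_congr_mem
    intro hist c _
    exact pvStepEq hist c
  rw [h1, PySem.Dict.items_counter]
  have h2 : PySem.Set.ofList (string.toList.map (fun c => String.ofList [c]))
      = (PySem.Set.ofList string.toList).map (fun c => String.ofList [c]) := by
    have := pvOfListMap (fun c : Char => String.ofList [c]) pvKeyInj string.toList []
    simpa [PySem.Set.ofList_eq_foldl] using this
  rw [h2, List.map_map, PySem.List.dedup_eq_ofList]
  refine List.map_congr_left (fun c _ => ?_)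
  simp only [Function.comp]
  congr 1
  rw [List.count_map_of_injective _ _ pvKeyInj]
  rw [PySem.List.sum_map_const_int]
  simp [List.count_eq_countP, List.countP_eq_length_filter]

-- ===== VERDICT (by name: the statement is the Claim_ definition above) =====
theorem make_char_hist_spec : Claim_equal_make_char_hist := by
  intro s _
  exact make_char_hist_eq s
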